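-- pv_equiv track=rewrite | github.com/SDM-TIB/falcon2.0 | main.py | get_question_combinatios
-- ===== SOURCE A (Python) =====
-- def get_question_combinatios(question,questionStopWords):
--     combinations=[]
--     tempCombination=""
--
--     for word in question.split(' '):
--         if word in questionStopWords:
--             if tempCombination != "":
--                 combinations.append(tempCombination.strip())
--                 tempCombination=""
--         else:
--             tempCombination=tempCombination+word+" "
--     if tempCombination != "":
--           combinations.append(tempCombination.strip())
--     return combinations
-- ===== SOURCE B (Python) =====
-- def get_question_combinatios(question, questionStopWords):
--     stop = set(questionStopWords)
--     words = question.split(' ')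
--     n = len(words)
--     combinations = []
--     i = 0
--     while i < n:
--         if words[i] in stop:
--             i += 1
--         else:
--             j = i + 1
--             while j < n and words[j] not in stop:
--                 j += 1
--             combinations.append(' '.join(words[i:j]).strip())
--             i = j
--     return combinations
-- ===== Notes on version B (the rewrite author's own statement) =====
-- stated objective: alternative
-- what changed: Replaces A's accumulator-string flush loop with a two-pointer index scan: stop words are collected into a set once, and each maximal run of non-stop words is located by advancing a second pointer, then sliced and joined in one step.
import Mathlib
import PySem

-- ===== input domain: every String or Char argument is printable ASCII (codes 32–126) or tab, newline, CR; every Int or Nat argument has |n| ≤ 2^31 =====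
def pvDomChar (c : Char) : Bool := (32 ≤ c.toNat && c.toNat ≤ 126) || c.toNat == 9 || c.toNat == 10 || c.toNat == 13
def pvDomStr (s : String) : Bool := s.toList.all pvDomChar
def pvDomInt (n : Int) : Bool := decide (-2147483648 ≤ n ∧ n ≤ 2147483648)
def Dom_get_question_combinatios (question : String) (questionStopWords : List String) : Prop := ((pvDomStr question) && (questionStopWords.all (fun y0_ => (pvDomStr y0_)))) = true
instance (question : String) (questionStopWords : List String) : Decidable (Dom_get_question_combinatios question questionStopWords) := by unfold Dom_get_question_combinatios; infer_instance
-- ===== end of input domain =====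

-- B re-implements the accumulator-flush loop as a two-pointer scan over word indices
-- (stop words collected into a set, each maximal non-stop run sliced and joined at once);
-- return values agree everywhere; objective: alternative structure, same cost.

-- ===== PORT A =====
-- one step of A's for-loop; state = (combinations, tempCombination)
def pvAStep (questionStopWords : List String) (st : List String × String) (word : String) : List String × String :=
  if questionStopWords.contains word then
    (if st.2 ≠ "" then (st.1 ++ [PySem.Str.strip st.2], "") else st)
  else
    (st.1, st.2 ++ word ++ " ")

def get_question_combinatios (question : String) (questionStopWords : List String) : List String :=
  let st := ((PySem.Str.split? question " ").getD []).foldl (pvAStep questionStopWords) ([], "")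
  if st.2 ≠ "" then st.1 ++ [PySem.Str.strip st.2] else st.1

-- ===== PORT B =====
-- inner while of Source B: advance j while j < n and words[j] not in stop
def pvRunEnd (stop : PySem.Set String) (words : List String) (n : Nat) (j : Nat) : Nat :=
  if j < n then
    if stop.contains (words.getD j "") then j
    else pvRunEnd stop words n (j + 1)
  else j
termination_by n - j

-- pvRunEnd never moves backwards (needed for pvBLoop's termination)
theorem pvRunEnd_ge (stop : PySem.Set String) (words : List String) (n j : Nat) :
    j ≤ pvRunEnd stop words n j := by
  induction hk : n - j using Nat.strong_induction_on generalizing j with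
  | _ k ih =>
    rw [pvRunEnd]
    by_cases h1 : j < n
    · rw [if_pos h1]
      by_cases h2 : stop.contains (words.getD j "") = true
      · rw [if_pos h2]
      · rw [if_neg h2]
        have := ih (n - (j + 1)) (by omega) (j + 1) rfl
        omega
    · rw [if_neg h1]

-- outer while of Source B: state = index i
def pvBLoop (stop : PySem.Set String) (words : List String) (n : Nat) (i : Nat) : List String :=
  if i < n then
    if stop.contains (words.getD i "") then pvBLoop stop words n (i + 1)
    else
      let j := pvRunEnd stop words n (i + 1)
      PySem.Str.strip (PySem.Str.join " " (PySem.List.slice words (some (i : Int)) (some (j : Int))))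
        :: pvBLoop stop words n j
  else []
termination_by n - i
decreasing_by
  · omega
  · have := pvRunEnd_ge stop words n (i + 1); omega

def get_question_combinatios_alt (question : String) (questionStopWords : List String) : List String :=
  let stop := PySem.Set.ofList questionStopWords
  let words := (PySem.Str.split? question " ").getD []
  pvBLoop stop words words.length 0

-- ===== PRECONDITION & SPEC =====
def Spec_get_question_combinatios (question : String) (questionStopWords : List String) (out : List String) : Prop := out = get_question_combinatios_alt question questionStopWords
instance (question : String) (questionStopWords : List String) (out : List String) : Decidable (Spec_get_question_combinatios question questionStopWords out) := by unfold Spec_get_question_combinatios; infer_instance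

-- ===== CLAIM (what is proved, stated in full; the proofs are below) =====
def Claim_equal_get_question_combinatios : Prop := ∀ (question : String) (questionStopWords : List String), Dom_get_question_combinatios question questionStopWords → Spec_get_question_combinatios question questionStopWords (get_question_combinatios question questionStopWords)

-- ===== LEMMAS AND PROOFS =====

-- length of the maximal non-stop prefix of a word list
def pvRunLen (sw : List String) : List String → Nat
  | [] => 0
  | w :: ws => if sw.contains w then 0 else pvRunLen sw ws + 1

-- structural (suffix-recursion) description of B's scan
def pvBSpec (sw : List String) : List String → List String
  | [] => []
  | w :: ws =>
    if sw.contains w then pvBSpec sw ws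
    else PySem.Str.strip (PySem.Str.join " " (w :: ws.take (pvRunLen sw ws)))
      :: pvBSpec sw (ws.drop (pvRunLen sw ws))
termination_by l => l.length
decreasing_by
  all_goals (simp; try omega)

-- A's final flush
def pvFinish (st : List String × String) : List String :=
  if st.2 ≠ "" then st.1 ++ [PySem.Str.strip st.2] else st.1

theorem pv_contains_ofList (sw : List String) (w : String) :
    (PySem.Set.ofList sw).contains w = sw.contains w := by
  by_cases h : w ∈ sw
  · have h2 : w ∈ PySem.Set.ofList sw := (PySem.Set.mem_ofList sw w).2 h
    simp [h, h2]
  · have h2 : w ∉ PySem.Set.ofList sw := fun hx => h ((PySem.Set.mem_ofList sw w).1 hx)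
    simp [h, h2]

-- string facts
theorem pv_append_space_ne (s : String) : s ++ " " ≠ "" := by
  intro h
  have : (s ++ " ").toList = ("" : String).toList := by rw [h]
  simp [String.toList_append] at this

theorem pv_rstrip_append_space (cs : List Char) :
    PySem.Chars.rstrip (cs ++ [' ']) = PySem.Chars.rstrip cs := by
  have hs : PySem.Chars.isspace ' ' = true := by decide
  simp [PySem.Chars.rstrip, hs]

theorem pv_strip_append_space (s : String) :
    PySem.Str.strip (s ++ " ") = PySem.Str.strip s := by
  rw [← String.toList_inj]
  rw [PySem.Str.toList_strip, PySem.Str.toList_strip, String.toList_append]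
  show PySem.Chars.strip (s.toList ++ [' ']) = _
  unfold PySem.Chars.strip
  rw [PySem.Chars.lstrip, PySem.Chars.lstrip, List.dropWhile_append]
  split
  · next h =>
    rw [List.isEmpty_iff] at h
    rw [h]
    have hs : PySem.Chars.isspace ' ' = true := by decide
    simp [List.dropWhile, hs]
  · exact pv_rstrip_append_space _

theorem pv_chars_join_append_singleton (sep : List Char) (ps : List (List Char)) (hp : ps ≠ []) (q : List Char) :
    PySem.Chars.join sep (ps ++ [q]) = PySem.Chars.join sep ps ++ sep ++ q := by
  induction ps with
  | nil => exact absurd rfl hp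
  | cons p ps ih =>
    cases ps with
    | nil => simp [PySem.Chars.join_cons_cons, PySem.Chars.join_singleton]
    | cons p2 ps2 =>
      rw [List.cons_append, List.cons_append, PySem.Chars.join_cons_cons, PySem.Chars.join_cons_cons]
      rw [← List.cons_append, ih (by simp)]
      simp [List.append_assoc]

theorem pv_join_singleton (w : String) : PySem.Str.join " " [w] = w := by
  rw [← String.toList_inj, PySem.Str.toList_join]
  simp [PySem.Chars.join_singleton]

theorem pv_join_append_singleton (run : List String) (hr : run ≠ []) (w : String) :
    PySem.Str.join " " (run ++ [w]) = PySem.Str.join " " run ++ " " ++ w := by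
  rw [← String.toList_inj]
  simp only [PySem.Str.toList_join, String.toList_append, List.map_append, List.map_cons, List.map_nil]
  rw [pv_chars_join_append_singleton _ _ (by simpa using hr)]

-- unfolding helpers for the if-guarded definitions
theorem pvRunLen_cons (sw : List String) (w : String) (ws : List String) :
    pvRunLen sw (w :: ws) = if sw.contains w then 0 else pvRunLen sw ws + 1 := rfl

theorem pvBSpec_cons_pos {sw : List String} {w : String} (ws : List String)
    (hw : sw.contains w = true) : pvBSpec sw (w :: ws) = pvBSpec sw ws := by
  rw [pvBSpec.eq_def]
  simp only [hw, if_true]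

theorem pvBSpec_cons_neg {sw : List String} {w : String} (ws : List String)
    (hw : ¬ sw.contains w = true) :
    pvBSpec sw (w :: ws) = PySem.Str.strip (PySem.Str.join " " (w :: ws.take (pvRunLen sw ws)))
      :: pvBSpec sw (ws.drop (pvRunLen sw ws)) := by
  rw [pvBSpec.eq_def]
  simp only [hw, if_false, Bool.false_eq_true]

-- the main invariant: A's loop, run from either kind of state, computes pvBSpec
theorem pv_main (sw : List String) (ws : List String) :
    (∀ c : List String, pvFinish (ws.foldl (pvAStep sw) (c, "")) = c ++ pvBSpec sw ws) ∧
    (∀ (c : List String) (run : List String), run ≠ [] →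
      pvFinish (ws.foldl (pvAStep sw) (c, PySem.Str.join " " run ++ " ")) =
        c ++ PySem.Str.strip (PySem.Str.join " " (run ++ ws.take (pvRunLen sw ws)))
          :: pvBSpec sw (ws.drop (pvRunLen sw ws))) := by
  induction ws with
  | nil =>
    constructor
    · intro c; simp [pvFinish, pvBSpec]
    · intro c run hr
      simp [pvFinish, pvBSpec, pvRunLen, pv_strip_append_space]
  | cons w ws ih =>
    constructor
    · intro c
      rw [List.foldl_cons]
      by_cases hw : sw.contains w = true
      · rw [show pvAStep sw (c, "") w = (c, "") by
          unfold pvAStep; rw [if_pos hw]; simp]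
        rw [ih.1 c, pvBSpec_cons_pos ws hw]
      · rw [show pvAStep sw (c, "") w = (c, PySem.Str.join " " [w] ++ " ") by
          unfold pvAStep; rw [if_neg hw, pv_join_singleton]; simp]
        rw [ih.2 c [w] (by simp)]
        rw [pvBSpec_cons_neg ws hw]
        rfl
    · intro c run hr
      rw [List.foldl_cons]
      by_cases hw : sw.contains w = true
      · rw [show pvAStep sw (c, PySem.Str.join " " run ++ " ") w
              = (c ++ [PySem.Str.strip (PySem.Str.join " " run ++ " ")], "") by
          unfold pvAStep; rw [if_pos hw, if_pos (pv_append_space_ne _)]]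
        rw [ih.1]
        rw [pvRunLen_cons, if_pos hw]
        simp only [List.take_zero, List.drop_zero, List.append_nil]
        rw [pvBSpec_cons_pos ws hw]
        simp [pv_strip_append_space]
      · rw [show pvAStep sw (c, PySem.Str.join " " run ++ " ") w
              = (c, PySem.Str.join " " (run ++ [w]) ++ " ") by
          unfold pvAStep; rw [if_neg hw, pv_join_append_singleton run hr w]]
        rw [ih.2 c (run ++ [w]) (by simp)]
        rw [pvRunLen_cons, if_neg hw]
        rw [List.take_succ_cons, List.drop_succ_cons]
        simp [List.append_assoc]

-- pvRunLen never exceeds the list length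
theorem pvRunLen_le (sw : List String) (l : List String) : pvRunLen sw l ≤ l.length := by
  induction l with
  | nil => simp [pvRunLen]
  | cons x xs ihx =>
    rw [pvRunLen_cons]
    by_cases hx : sw.contains x = true
    · rw [if_pos hx]; simp
    · rw [if_neg hx]; simp; omega

-- pvRunEnd computes j + run length of the suffix
theorem pvRunEnd_eq (sw : List String) (words : List String) (j : Nat) (hj : j ≤ words.length) :
    pvRunEnd (PySem.Set.ofList sw) words words.length j = j + pvRunLen sw (words.drop j) := by
  induction hk : words.length - j using Nat.strong_induction_on generalizing j with
  | _ k ih =>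
    rw [pvRunEnd]
    by_cases h : j < words.length
    · rw [if_pos h]
      have hd : words.drop j = words[j] :: words.drop (j + 1) := List.drop_eq_getElem_cons h
      have hg : words.getD j "" = words[j] := by simp [List.getD, h]
      rw [pv_contains_ofList, hg]
      by_cases hw : sw.contains words[j] = true
      · rw [if_pos hw, hd, pvRunLen_cons, if_pos hw]
        omega
      · rw [if_neg hw]
        rw [ih (words.length - (j + 1)) (by omega) (j + 1) (by omega) rfl]
        rw [hd, pvRunLen_cons, if_neg hw]
        omega
    · rw [if_neg h]
      have hdn : words.drop j = [] := List.drop_eq_nil_of_le (by omega)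
      rw [hdn]
      simp [pvRunLen]

-- pvBLoop computes pvBSpec of the suffix
set_option maxHeartbeats 1000000 in
theorem pvBLoop_eq (sw : List String) (words : List String) (i : Nat) (hi : i ≤ words.length) :
    pvBLoop (PySem.Set.ofList sw) words words.length i = pvBSpec sw (words.drop i) := by
  induction hk : words.length - i using Nat.strong_induction_on generalizing i with
  | _ k ih =>
    rw [pvBLoop]
    by_cases h : i < words.length
    · rw [if_pos h]
      have hd : words.drop i = words[i] :: words.drop (i + 1) := List.drop_eq_getElem_cons h
      have hg : words.getD i "" = words[i] := by simp [List.getD, h]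
      rw [pv_contains_ofList, hg]
      by_cases hw : sw.contains words[i] = true
      · rw [if_pos hw]
        rw [ih (words.length - (i + 1)) (by omega) (i + 1) (by omega) rfl]
        rw [hd, pvBSpec_cons_pos _ hw]
      · rw [if_neg hw]
        show PySem.Str.strip (PySem.Str.join " " (PySem.List.slice words (some (i : Int))
              (some ((pvRunEnd (PySem.Set.ofList sw) words words.length (i + 1) : Nat) : Int))))
            :: pvBLoop (PySem.Set.ofList sw) words words.length
                (pvRunEnd (PySem.Set.ofList sw) words words.length (i + 1))
          = pvBSpec sw (words.drop i)
        have hre := pvRunEnd_eq sw words (i + 1) (by omega)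
        have hrl : pvRunLen sw (words.drop (i + 1)) ≤ (words.drop (i + 1)).length :=
          pvRunLen_le sw _
        have hle : pvRunEnd (PySem.Set.ofList sw) words words.length (i + 1) ≤ words.length := by
          rw [hre]; simp at hrl; omega
        rw [ih (words.length - pvRunEnd (PySem.Set.ofList sw) words words.length (i + 1)) (by
              have := pvRunEnd_ge (PySem.Set.ofList sw) words words.length (i + 1)
              omega)
            _ hle rfl]
        have hslice : PySem.List.slice words (some (i : Int))
              (some ((pvRunEnd (PySem.Set.ofList sw) words words.length (i + 1) : Nat) : Int))
            = words[i] :: (words.drop (i + 1)).take (pvRunLen sw (words.drop (i + 1))) := by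
          rw [hre, PySem.List.slice_natCast]
          rw [show i + 1 + pvRunLen sw (words.drop (i + 1)) - i
                = 1 + pvRunLen sw (words.drop (i + 1)) by omega]
          rw [hd, List.take_cons (by omega)]
          rw [show 1 + pvRunLen sw (words.drop (i + 1)) - 1
                = pvRunLen sw (words.drop (i + 1)) by omega]
        have hdropE : words.drop (pvRunEnd (PySem.Set.ofList sw) words words.length (i + 1))
            = (words.drop (i + 1)).drop (pvRunLen sw (words.drop (i + 1))) := by
          rw [hre, List.drop_drop]
        rw [hslice, hdropE, hd, pvBSpec_cons_neg _ hw]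
    · rw [if_neg h]
      have hdn : words.drop i = [] := List.drop_eq_nil_of_le (by omega)
      rw [hdn, pvBSpec]

-- ===== VERDICT (by name: the statement is the Claim_ definition above) =====
theorem get_question_combinatios_spec : Claim_equal_get_question_combinatios := by
  intro question questionStopWords _
  unfold Spec_get_question_combinatios get_question_combinatios get_question_combinatios_alt
  rw [pvBLoop_eq questionStopWords _ 0 (by omega)]
  simp only [List.drop_zero]
  have := (pv_main questionStopWords ((PySem.Str.split? question " ").getD [])).1 []
  unfold pvFinish at this
  simpa using this
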